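-- pv_equiv track=rewrite | github.com/HansHans135/bopomofo | src/translate.py | engtyping_rearrange
-- ===== SOURCE A (Python) =====
-- punctuations = '、，。？！：；'
--
-- def sort_keys(text):
--     output = ''
--     order = '1qaz2wsxedcrfv5tgbyhnujm8ik,9ol.0p;/-'
--     for char in order:
--         if char in text:
--             output += char
--     return output
--
-- def engtyping_rearrange(text):
--     tmp = ''
--     output = ''
--     for char in text:
--         if char in ' 6347' or char in punctuations:
--             output += sort_keys(tmp) + char
--             tmp = ''
--             continue
--         tmp += char
--     return output
-- ===== SOURCE B (Python) =====
-- punctuations = '、，。？！：；'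
--
-- def engtyping_rearrange(text):
--     # Segment-at-a-time rewrite: repeatedly find the next delimiter, emit the
--     # filtered segment plus the delimiter, and continue on the remainder.
--     delims = ' 6347' + punctuations
--     order = '1qaz2wsxedcrfv5tgbyhnujm8ik,9ol.0p;/-'
--     pieces = []
--     rest = text
--     while True:
--         i = next((k for k, c in enumerate(rest) if c in delims), -1)
--         if i < 0:
--             break
--         seg = rest[:i]
--         pieces.append(''.join(c for c in order if c in seg) + rest[i])
--         rest = rest[i + 1:]
--     return ''.join(pieces)
-- ===== Notes on version B (the rewrite author's own statement) =====
-- stated objective: alternative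
-- what changed: B replaces A's char-by-char state machine (accumulating a tmp string and growing the output by repeated concatenation, with a sort_keys helper that builds its result by appends) with a segment-at-a-time while-loop: find the index of the next delimiter, slice the segment out, emit the order-filter of that segment as a join-comprehension plus the delimiter, and continue on the remaining slice.
import Mathlib
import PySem

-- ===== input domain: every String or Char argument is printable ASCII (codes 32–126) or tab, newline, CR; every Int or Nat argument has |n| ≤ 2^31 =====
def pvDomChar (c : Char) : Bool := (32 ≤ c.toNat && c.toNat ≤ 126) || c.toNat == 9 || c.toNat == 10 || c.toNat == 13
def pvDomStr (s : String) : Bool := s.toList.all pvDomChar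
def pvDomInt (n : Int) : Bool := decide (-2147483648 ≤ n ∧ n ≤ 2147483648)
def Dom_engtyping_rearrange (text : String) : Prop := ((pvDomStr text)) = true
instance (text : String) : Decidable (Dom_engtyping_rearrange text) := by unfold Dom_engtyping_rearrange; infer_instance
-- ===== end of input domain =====

-- B rewrites A's char-by-char state machine as a segment-at-a-time loop (find next
-- delimiter, slice, filter); same values everywhere (objective: alternative).

-- ===== PORT A =====
def pvPunct : List Char := "、，。？！：；".toList
def pvOrderA : List Char := "1qaz2wsxedcrfv5tgbyhnujm8ik,9ol.0p;/-".toList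

-- sort_keys: for char in order: if char in text: output += char
def pvSortKeys (tmp : List Char) : List Char :=
  pvOrderA.foldl (fun out c => if tmp.contains c then out ++ [c] else out) []

-- the for-loop of A over (tmp, output)
def pvLoopA (tmp out : List Char) : List Char → List Char
  | [] => out
  | c :: cs =>
      if (" 6347".toList).contains c || pvPunct.contains c then
        pvLoopA [] (out ++ pvSortKeys tmp ++ [c]) cs
      else
        pvLoopA (tmp ++ [c]) out cs

def engtyping_rearrange (text : String) : String :=
  String.ofList (pvLoopA [] [] text.toList)

-- ===== PORT B =====
def pvDelimsB : List Char := (" 6347" ++ "、，。？！：；").toList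
def pvOrderB : List Char := "1qaz2wsxedcrfv5tgbyhnujm8ik,9ol.0p;/-".toList

-- the while-loop of Source B: next((k for k,c in enumerate(rest) if c in delims), -1)
-- is findIdx? (none = the -1 / break case); rest[:i] and rest[i+1:] are slices with
-- 0 ≤ i < len(rest), exactly List.take i / List.drop (i+1); rest[i] is a valid
-- index, exactly rest[i]?.getD.
def pvLoopB (pieces : List (List Char)) (rest : List Char) : List (List Char) :=
  match h : rest.findIdx? (fun c => pvDelimsB.contains c) with
  | none => pieces
  | some i =>
      pvLoopB
        (pieces ++ [pvOrderB.filter (fun c => (rest.take i).contains c) ++ [rest[i]?.getD ' ']])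
        (rest.drop (i + 1))
  termination_by rest.length
  decreasing_by
    have hne : rest ≠ [] := by
      intro he; subst he; simp [List.findIdx?, List.findIdx?.go] at h
    have : 0 < rest.length := List.length_pos_iff.mpr hne
    simp [List.length_drop]; omega

def engtyping_rearrange_alt (text : String) : String :=
  String.ofList (pvLoopB [] text.toList).flatten

-- ===== PRECONDITION & SPEC =====
def Spec_engtyping_rearrange (text : String) (out : String) : Prop := out = engtyping_rearrange_alt text
instance (text : String) (out : String) : Decidable (Spec_engtyping_rearrange text out) := by unfold Spec_engtyping_rearrange; infer_instance

-- ===== CLAIM (what is proved, stated in full; the proofs are below) =====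
def Claim_equal_engtyping_rearrange : Prop := ∀ (text : String), Dom_engtyping_rearrange text → Spec_engtyping_rearrange text (engtyping_rearrange text)

-- ===== LEMMAS AND PROOFS =====

-- the two delimiter tests agree
theorem delims_eq (c : Char) :
    ((" 6347".toList).contains c || pvPunct.contains c) =
      pvDelimsB.contains c := by
  simp [pvPunct, pvDelimsB, List.contains_eq_mem,
    Bool.or_assoc]

-- sort_keys is the filter of order by membership in tmp
theorem sortKeys_eq_filter (tmp : List Char) :
    pvSortKeys tmp = pvOrderA.filter (fun c => tmp.contains c) := by
  unfold pvSortKeys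
  generalize pvOrderA = l
  induction l using List.reverseRecOn with
  | nil => simp
  | append_singleton l c ih =>
      simp [List.foldl_append, List.filter_append]
      split <;> simp_all

theorem findIdx?_prefix_none {p : Char → Bool} (tmp : List Char)
    (hfree : ∀ x ∈ tmp, p x = false) (cs : List Char) (c : Char) (hc : p c = true) :
    (tmp ++ c :: cs).findIdx? p = some tmp.length := by
  induction tmp with
  | nil => simp [List.findIdx?_cons, hc]
  | cons a t ih =>
      have ha : p a = false := hfree a (by simp)
      simp only [List.cons_append, List.findIdx?_cons, ha, Bool.false_eq_true,
        List.length_cons]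
      rw [ih (fun x hx => hfree x (by simp [hx]))]
      rfl

theorem findIdx?_all_none {p : Char → Bool} (tmp : List Char)
    (hfree : ∀ x ∈ tmp, p x = false) : tmp.findIdx? p = none := by
  rw [List.findIdx?_eq_none_iff]
  exact hfree

-- main invariant: A's loop, run with a delimiter-free partial segment tmp and
-- output = flatten pieces, equals B's loop run on tmp ++ cs with those pieces.
theorem loopA_eq_loopB (cs : List Char) : ∀ (tmp : List Char) (pieces : List (List Char)),
    (∀ x ∈ tmp, pvDelimsB.contains x = false) →
    pvLoopA tmp pieces.flatten cs = (pvLoopB pieces (tmp ++ cs)).flatten := by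
  induction cs with
  | nil =>
      intro tmp pieces hfree
      rw [List.append_nil, pvLoopA, pvLoopB]
      split
      · rfl
      · rename_i i h
        rw [findIdx?_all_none tmp hfree] at h
        exact absurd h (by simp)
  | cons c cs ih =>
      intro tmp pieces hfree
      rw [pvLoopA]
      by_cases hc : pvDelimsB.contains c = true
      · rw [if_pos (by rw [delims_eq]; exact hc)]
        rw [pvLoopB]
        split
        · rename_i h
          rw [findIdx?_prefix_none tmp hfree cs c hc] at h
          exact absurd h (by simp)
        · rename_i i h
          rw [findIdx?_prefix_none tmp hfree cs c hc] at h
          injection h with h; subst h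
          have htake : (tmp ++ c :: cs).take tmp.length = tmp := by
            simp
          have hget : (tmp ++ c :: cs)[tmp.length]?.getD ' ' = c := by
            simp
          have hdrop : (tmp ++ c :: cs).drop (tmp.length + 1) = cs := by
            have he : tmp ++ c :: cs = (tmp ++ [c]) ++ cs := by simp
            rw [he, List.drop_left' (by simp)]
          rw [htake, hget, hdrop]
          have := ih [] (pieces ++ [pvOrderB.filter (fun x => tmp.contains x) ++ [c]])
            (by intro x hx; simp at hx)
          simp only [List.nil_append] at this
          rw [← this]
          simp [sortKeys_eq_filter, pvOrderA, pvOrderB]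
      · rw [if_neg (by rw [delims_eq]; simpa using hc)]
        have := ih (tmp ++ [c]) pieces (by
          intro x hx
          rcases List.mem_append.mp hx with h | h
          · exact hfree x h
          · simp at h; subst h; simpa using hc)
        simpa using this

-- ===== VERDICT (by name: the statement is the Claim_ definition above) =====
theorem engtyping_rearrange_spec : Claim_equal_engtyping_rearrange := by
  intro text _
  unfold Spec_engtyping_rearrange engtyping_rearrange engtyping_rearrange_alt
  have := loopA_eq_loopB text.toList [] [] (by intro x hx; simp at hx)
  simp only [List.flatten_nil, List.nil_append] at this
  rw [this]
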